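-- pv_equiv track=rewrite | github.com/Cached-Memory-RISCV-ECE338-uth/cached_memory_RISCV | riscv-RV32I_UNIT_TESTS/testbench/Assembler/makehex.py | format_hex_data
-- ===== SOURCE A (Python) =====
-- def format_hex_data(hex_data, start_address):
--     # Split the hex data into a list
--     hex_list = hex_data.split()
--
--     # Group the hex data into chunks of 16
--     chunks = [hex_list[i:i+16] for i in range(0, len(hex_list), 16)]
--
--     # Initialize the formatted output
--     formatted_output = []
--
--     # Loop through each chunk and format it
--     for i, chunk in enumerate(chunks):
--         # Create the address part of the line
--         address = f"@0000{start_address + i:03x}"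
--         # Join the chunk in reverse order with underscores
--         data = "_".join(chunk[::-1])
--         # Combine the address and data
--         formatted_line = f"{address} {data}"
--         # Add the formatted line to the output list
--         formatted_output.append(formatted_line)
--
--     # Join the formatted output lines with newlines
--     return "\n".join(formatted_output)
-- ===== SOURCE B (Python) =====
-- def format_hex_data(hex_data, start_address):
--     # Single streaming pass: build each line's word buffer front-to-back
--     # (prepending achieves the per-16 reversal) and flush every 16 words.
--     lines = []
--     buf = []
--     count = 0
--     for word in hex_data.split():
--         buf = [word] + buf
--         if len(buf) == 16:
--             lines.append(f"@0000{start_address + count:03x} " + "_".join(buf))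
--             buf = []
--             count += 1
--     if buf:
--         lines.append(f"@0000{start_address + count:03x} " + "_".join(buf))
--     return "\n".join(lines)
-- ===== Notes on version B (the rewrite author's own statement) =====
-- stated objective: alternative
-- what changed: Replaces the slice-based chunk comprehension plus enumerate/format loop by a single streaming pass that prepends each word to a line buffer (so the per-16 reversal happens during grouping) and flushes a finished line every 16 words, with a final flush for the partial line.
import Mathlib
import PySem

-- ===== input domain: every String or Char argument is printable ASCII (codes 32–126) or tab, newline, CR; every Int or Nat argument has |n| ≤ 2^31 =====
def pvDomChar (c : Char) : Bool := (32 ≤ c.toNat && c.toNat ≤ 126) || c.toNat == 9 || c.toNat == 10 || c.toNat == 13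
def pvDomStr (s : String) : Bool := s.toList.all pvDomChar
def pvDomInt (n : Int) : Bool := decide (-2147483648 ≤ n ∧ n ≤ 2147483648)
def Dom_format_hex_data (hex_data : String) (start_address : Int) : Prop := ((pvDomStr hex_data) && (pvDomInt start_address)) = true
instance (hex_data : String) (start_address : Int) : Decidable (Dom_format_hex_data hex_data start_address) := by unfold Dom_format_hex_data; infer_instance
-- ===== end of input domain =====

-- B replaces A's slice-based chunking + enumerate/format loop by one streaming pass
-- that prepends words to a line buffer and flushes every 16 words (alternative decomposition).


-- ===== PORT A =====
-- f"{n:x}" digits, hand-ported (PySem has no hex formatter): exact lowercase hex of a Nat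
def pyHexDigit (n : Nat) : Char := if n < 10 then Char.ofNat (48 + n) else Char.ofNat (87 + n)

def pyHexDigits (n : Nat) : List Char :=
  if _h : n < 16 then [pyHexDigit n]
  else pyHexDigits (n / 16) ++ [pyHexDigit (n % 16)]
decreasing_by exact Nat.div_lt_self (by omega) (by omega)

-- f"{n:03x}": sign, lowercase hex digits, zero-padded to width 3 (pad goes after the sign = zfill)
def pyFmt03x (n : Int) : String :=
  PySem.Str.zfill (String.ofList (if n < 0 then '-' :: pyHexDigits n.natAbs else pyHexDigits n.natAbs)) 3

def format_hex_data (hex_data : String) (start_address : Int) : String :=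
  let hex_list := PySem.Str.split₀ hex_data
  let chunks := (PySem.List.pyRange 0 (hex_list.length : Int) 16).map
    (fun i => PySem.List.slice hex_list (some i) (some (i + 16)))
  let formatted_output := (PySem.List.enumerate chunks).map
    (fun p => "@0000" ++ pyFmt03x (start_address + p.1) ++ " " ++ PySem.Str.join "_" p.2.reverse)
  PySem.Str.join "\n" formatted_output

-- ===== PORT B =====
def goB (start_address : Int) (words : List String) (buf : List String) (count : Int)
    (lines : List String) : List String :=
  match words with
  | [] =>
    if buf = [] then lines
    else lines ++ ["@0000" ++ pyFmt03x (start_address + count) ++ " " ++ PySem.Str.join "_" buf]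
  | w :: ws =>
    let buf' := w :: buf
    if buf'.length = 16 then
      goB start_address ws [] (count + 1)
        (lines ++ ["@0000" ++ pyFmt03x (start_address + count) ++ " " ++ PySem.Str.join "_" buf'])
    else goB start_address ws buf' count lines

def format_hex_data_alt (hex_data : String) (start_address : Int) : String :=
  PySem.Str.join "\n" (goB start_address (PySem.Str.split₀ hex_data) [] 0 [])

-- ===== PRECONDITION & SPEC =====
def Spec_format_hex_data (hex_data : String) (start_address : Int) (out : String) : Prop := out = format_hex_data_alt hex_data start_address
instance (hex_data : String) (start_address : Int) (out : String) : Decidable (Spec_format_hex_data hex_data start_address out) := by unfold Spec_format_hex_data; infer_instance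

-- ===== CLAIM (what is proved, stated in full; the proofs are below) =====
def Claim_equal_format_hex_data : Prop := ∀ (hex_data : String) (start_address : Int), Dom_format_hex_data hex_data start_address → Spec_format_hex_data hex_data start_address (format_hex_data hex_data start_address)

-- ===== LEMMAS AND PROOFS =====

-- canonical chunking: successive groups of 16 words
def chunksOf (ws : List String) : List (List String) :=
  if ws = [] then [] else ws.take 16 :: chunksOf (ws.drop 16)
termination_by ws.length
decreasing_by
  rename_i h; cases ws with
  | nil => exact absurd rfl h
  | cons a t => simp

theorem chunksOf_nil : chunksOf [] = [] := by unfold chunksOf; simp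

theorem chunksOf_ne {ws : List String} (h : ws ≠ []) :
    chunksOf ws = ws.take 16 :: chunksOf (ws.drop 16) := by
  rw [chunksOf]; simp [h]

def mkLine (sa c : Int) (b : List String) : String :=
  "@0000" ++ pyFmt03x (sa + c) ++ " " ++ PySem.Str.join "_" b

theorem pyRange16_nil {a : Int} (h : a ≤ 0) : PySem.List.pyRange 0 a 16 = [] := by
  rw [PySem.List.pyRange_of_pos 0 a (by norm_num)]
  simp [show ¬(0 < a) by omega]

theorem pyRange16_cons {n : Int} (h : 0 < n) :
    PySem.List.pyRange 0 n 16 = 0 :: (PySem.List.pyRange 0 (n - 16) 16).map (· + 16) := by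
  by_cases h2 : 0 < n - 16
  · rw [PySem.List.pyRange_of_pos 0 n (by norm_num),
      PySem.List.pyRange_of_pos 0 (n - 16) (by norm_num)]
    rw [if_pos h, if_pos h2]
    have he : ((n - 0 + 16 - 1) / 16).toNat = ((n - 16 - 0 + 16 - 1) / 16).toNat + 1 := by omega
    rw [he, List.range_succ_eq_map]
    simp only [List.map_cons, List.map_map, Nat.cast_zero]
    congr 1
  · rw [PySem.List.pyRange_of_pos 0 n (by norm_num), if_pos h]
    have he : ((n - 0 + 16 - 1) / 16).toNat = 1 := by omega
    rw [he, pyRange16_nil (a := n - 16) (by omega)]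
    simp

theorem slice_shift (ws : List String) (i : Int) (hi : 0 ≤ i) :
    PySem.List.slice ws (some (i + 16)) (some (i + 16 + 16)) =
      PySem.List.slice (ws.drop 16) (some i) (some (i + 16)) := by
  obtain ⟨k, rfl⟩ := Int.eq_ofNat_of_zero_le hi
  have h1 : ((k : Int) + 16) = ((k + 16 : Nat) : Int) := by push_cast; ring
  have h2 : ((k : Int) + 16 + 16) = ((k + 32 : Nat) : Int) := by push_cast; ring
  rw [h2, h1, PySem.List.slice_natCast, PySem.List.slice_natCast, List.drop_drop]
  congr 1
  · omega
  · rw [Nat.add_comm]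

-- A's pyRange/slice chunking equals chunksOf
theorem chunks_eq (ws : List String) :
    (PySem.List.pyRange 0 (ws.length : Int) 16).map
      (fun i => PySem.List.slice ws (some i) (some (i + 16))) = chunksOf ws := by
  induction ws using chunksOf.induct with
  | case1 => simp [pyRange16_nil (le_refl (0 : Int)), chunksOf_nil]
  | case2 ws h ih =>
    rw [chunksOf_ne h]
    have hn : 0 < (ws.length : Int) := by
      have := List.length_pos_of_ne_nil h; omega
    rw [pyRange16_cons hn, List.map_cons, List.map_map]
    have hhead : PySem.List.slice ws (some 0) (some (0 + 16)) = ws.take 16 := by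
      simpa using PySem.List.slice_natCast ws 0 16
    rw [hhead]
    congr 1
    have hmap : ((PySem.List.pyRange 0 ((ws.length : Int) - 16) 16).map
        ((fun i => PySem.List.slice ws (some i) (some (i + 16))) ∘ (· + 16))) =
        (PySem.List.pyRange 0 ((ws.length : Int) - 16) 16).map
          (fun i => PySem.List.slice (ws.drop 16) (some i) (some (i + 16))) := by
      refine List.map_congr_left ?_
      intro i hi
      have h0i : 0 ≤ i := ((PySem.List.mem_pyRange_iff_of_pos (by norm_num) i).mp hi).1
      simpa [Function.comp] using slice_shift ws i h0i
    rw [hmap]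
    by_cases h16 : 16 ≤ ws.length
    · have hlen : (((ws.drop 16).length : Int)) = (ws.length : Int) - 16 := by
        simp; omega
      rw [← hlen]; exact ih
    · have hd : ws.drop 16 = [] := by
        apply List.drop_eq_nil_of_le; omega
      rw [pyRange16_nil (by omega), hd, chunksOf_nil]
      simp

-- B's loop invariant
theorem goB_spec (sa : Int) (ws : List String) : ∀ (buf : List String) (c : Int)
    (lines : List String), buf.length < 16 →
    goB sa ws buf c lines =
      lines ++ (PySem.List.enumerate (chunksOf (buf.reverse ++ ws)) c).map
        (fun p => mkLine sa p.1 p.2.reverse) := by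
  induction ws with
  | nil =>
    intro buf c lines hb
    unfold goB
    by_cases hb0 : buf = []
    · simp [hb0, chunksOf_nil]
    · have hrev : buf.reverse ++ [] ≠ [] := by simpa
      rw [if_neg hb0, chunksOf_ne hrev]
      have ht : (buf.reverse ++ ([] : List String)).take 16 = buf.reverse := by
        simp; omega
      have hd : (buf.reverse ++ ([] : List String)).drop 16 = [] := by
        apply List.drop_eq_nil_of_le; simp; omega
      rw [ht, hd, chunksOf_nil]
      simp [PySem.List.enumerate_cons, mkLine]
  | cons w ws ih =>
    intro buf c lines hb
    unfold goB
    by_cases h16 : (w :: buf).length = 16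
    · rw [if_pos h16, ih [] (c + 1) _ (by simp)]
      have hsplit : buf.reverse ++ w :: ws = (w :: buf).reverse ++ ws := by simp
      have hne : (w :: buf).reverse ++ ws ≠ [] := by simp
      rw [hsplit, chunksOf_ne hne,
        List.take_left' (by simpa using h16), List.drop_left' (by simpa using h16)]
      simp [PySem.List.enumerate_cons, mkLine]
    · have hlt : (w :: buf).length < 16 := by
        simp at h16 ⊢; omega
      rw [if_neg h16, ih (w :: buf) c lines hlt]
      have : (w :: buf).reverse ++ ws = buf.reverse ++ w :: ws := by simp
      rw [this]

-- ===== VERDICT (by name: the statement is the Claim_ definition above) =====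
theorem format_hex_data_spec : Claim_equal_format_hex_data := by
  intro hex_data sa _
  unfold Spec_format_hex_data format_hex_data format_hex_data_alt
  dsimp only
  rw [chunks_eq, goB_spec sa _ [] 0 [] (by simp)]
  simp [mkLine]
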